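-- pv_equiv track=rewrite | github.com/junesnow0806/USTC-AI-2022SP | exp/exp2/src1/DecisionTree.py | same_on_attrs
-- ===== SOURCE A (Python) =====
-- def same_on_attrs(samples, train_features, attrs):
--     '''
--     样本集: samples
--     属性集: attrs
--     判断样本集是否在属性集上的取值都一样
--     '''
--     features_samples = []
--     for sample in samples:
--         tmp = []
--         for attr in attrs:
--             tmp.append(train_features[sample][attr])
--         features_samples.append(tmp)
--     if len(features_samples) > 1:
--         for i in range(1, len(features_samples)):
--             if features_samples[i] != features_samples[0]:
--                 return False
--     return True
-- ===== SOURCE B (Python) =====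
-- def same_on_attrs(samples, train_features, attrs):
--     # Column-wise: every attribute's column of values over the samples is constant.
--     return all(
--         len({train_features[sample][attr] for sample in samples}) <= 1
--         for attr in attrs
--     )
-- ===== Notes on version B (the rewrite author's own statement) =====
-- stated objective: idiomatic
-- what changed: B transposes the traversal: instead of materializing a row per sample and comparing every later row to the first, it checks each attribute independently, collecting that attribute's column of values over the samples into a set and requiring at most one distinct value, short-circuiting on the first non-uniform attribute; no per-sample rows are ever built.
import Mathlib
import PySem

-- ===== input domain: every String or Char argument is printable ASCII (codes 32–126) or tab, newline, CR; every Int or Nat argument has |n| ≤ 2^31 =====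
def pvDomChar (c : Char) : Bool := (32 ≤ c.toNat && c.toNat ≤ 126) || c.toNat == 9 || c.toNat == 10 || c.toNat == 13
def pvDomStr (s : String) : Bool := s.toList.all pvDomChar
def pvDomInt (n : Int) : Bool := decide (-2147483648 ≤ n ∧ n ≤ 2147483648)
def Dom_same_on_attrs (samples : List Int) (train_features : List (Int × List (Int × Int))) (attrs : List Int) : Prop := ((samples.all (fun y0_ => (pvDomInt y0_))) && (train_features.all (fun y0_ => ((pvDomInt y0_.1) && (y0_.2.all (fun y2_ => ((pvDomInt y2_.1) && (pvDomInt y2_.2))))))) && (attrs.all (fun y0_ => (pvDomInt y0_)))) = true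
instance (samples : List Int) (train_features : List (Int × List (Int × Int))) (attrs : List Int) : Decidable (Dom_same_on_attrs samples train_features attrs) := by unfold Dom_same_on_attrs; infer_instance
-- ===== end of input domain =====

-- B transposes the traversal: per-attribute column sets of size ≤ 1 instead of per-sample rows compared to the first row (idiomatic; return value only).

-- ===== PORT A =====
-- the early-exit index loop 'for i in range(1, len): if fs[i] != fs[0]: return False'
def pvLoopA (fs : List (List Int)) : List Int → Bool
  | [] => true
  | i :: rest =>
      if PySem.List.pyGetD fs i [] ≠ PySem.List.pyGetD fs 0 [] then false
      else pvLoopA fs rest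

def same_on_attrs (samples : List Int) (train_features : List (Int × List (Int × Int))) (attrs : List Int) : Bool :=
  let features_samples : List (List Int) :=
    samples.foldl (fun fs sample =>
      fs ++ [attrs.foldl (fun tmp attr =>
        tmp ++ [(PySem.Dict.ofList ((PySem.Dict.ofList train_features).getD sample [])).getD attr 0]) []]) []
  if features_samples.length > 1 then
    pvLoopA features_samples (PySem.List.pyRange 1 features_samples.length 1)
  else true

-- ===== PORT B =====
-- 'all(len({tf[s][a] for s in samples}) <= 1 for a in attrs)': a set comprehension per attribute
def same_on_attrs_alt (samples : List Int) (train_features : List (Int × List (Int × Int))) (attrs : List Int) : Bool :=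
  attrs.all (fun attr =>
    decide (PySem.Set.len
      (samples.foldl (fun st sample =>
        PySem.Set.add st ((PySem.Dict.ofList ((PySem.Dict.ofList train_features).getD sample [])).getD attr 0))
        PySem.Set.empty) ≤ 1))

-- ===== PRECONDITION & SPEC =====
-- Pre_ excludes exactly the inputs where Python A raises KeyError: for some sample and some
-- attr, the sample is missing from train_features or that attr is missing from its feature
-- dict (with attrs empty the lookup is never evaluated, so nothing is excluded then).
def Pre_same_on_attrs (samples : List Int) (train_features : List (Int × List (Int × Int))) (attrs : List Int) : Prop :=
  (samples.all (fun s => attrs.all (fun a =>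
    (PySem.Dict.ofList train_features).contains s &&
    (PySem.Dict.ofList ((PySem.Dict.ofList train_features).getD s [])).contains a))) = true
instance (samples : List Int) (train_features : List (Int × List (Int × Int))) (attrs : List Int) : Decidable (Pre_same_on_attrs samples train_features attrs) := by unfold Pre_same_on_attrs; infer_instance

def pvWitness_same_on_attrs : List Int × (List (Int × List (Int × Int))) × List Int :=
  ([0, 1], [(0, [(0, 1)]), (1, [(0, 1)])], [0])

def Spec_same_on_attrs (samples : List Int) (train_features : List (Int × List (Int × Int))) (attrs : List Int) (out : Bool) : Prop := out = same_on_attrs_alt samples train_features attrs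
instance (samples : List Int) (train_features : List (Int × List (Int × Int))) (attrs : List Int) (out : Bool) : Decidable (Spec_same_on_attrs samples train_features attrs out) := by unfold Spec_same_on_attrs; infer_instance

-- ===== CLAIM (what is proved, stated in full; the proofs are below) =====
def Claim_equal_same_on_attrs : Prop := ∀ (samples : List Int) (train_features : List (Int × List (Int × Int))) (attrs : List Int), Dom_same_on_attrs samples train_features attrs → Pre_same_on_attrs samples train_features attrs → Spec_same_on_attrs samples train_features attrs (same_on_attrs samples train_features attrs)

-- ===== LEMMAS AND PROOFS =====

theorem pv_foldl_app {α β : Type} (f : α → β) : ∀ (l : List α) (acc : List β),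
    l.foldl (fun a x => a ++ [f x]) acc = acc ++ l.map f := by
  intro l
  induction l with
  | nil => simp
  | cons x xs ih => intro acc; simp [List.foldl, ih]

theorem pvLoopA_eq_all (fs : List (List Int)) : ∀ (l : List Int),
    pvLoopA fs l = l.all (fun i => PySem.List.pyGetD fs i [] == PySem.List.pyGetD fs 0 []) := by
  intro l
  induction l with
  | nil => rfl
  | cons i rest ih =>
      simp only [pvLoopA, List.all_cons, ih]
      by_cases h : PySem.List.pyGetD fs i [] = PySem.List.pyGetD fs 0 [] <;> simp [h]

theorem pv_len_foldl_add_ge {α : Type} [BEq α] : ∀ (l : List α) (s : PySem.Set α),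
    s.length ≤ (l.foldl PySem.Set.add s).length := by
  intro l
  induction l with
  | nil => intro s; simp
  | cons x xs ih =>
      intro s
      refine le_trans ?_ (ih (PySem.Set.add s x))
      simp only [PySem.Set.add]
      split <;> simp

-- the distinct-value set of a nonempty list has at most one element iff all elements equal the first
theorem pv_set_card_le_one {α : Type} [DecidableEq α] : ∀ (rest : List α) (r0 : α),
    decide ((PySem.Set.ofList (r0 :: rest)).length ≤ 1)
      = rest.all (fun r => r == r0) := by
  intro rest
  induction rest with
  | nil => intro r0; rfl
  | cons r rest' ih =>
      intro r0
      by_cases h : r = r0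
      · subst h
        have e1 : PySem.Set.ofList (r :: r :: rest')
            = PySem.Set.ofList (r :: rest') := by
          simp [PySem.Set.ofList, List.foldl, PySem.Set.add, PySem.Set.empty,
            PySem.Set.contains]
        rw [e1, ih r]
        simp
      · have e2 : PySem.Set.ofList (r0 :: r :: rest')
            = rest'.foldl PySem.Set.add [r0, r] := by
          simp [PySem.Set.ofList, List.foldl, PySem.Set.add, PySem.Set.empty,
            PySem.Set.contains, h]
        have hge := pv_len_foldl_add_ge rest' ([r0, r] : PySem.Set α)
        simp only [List.length_cons, List.length_nil] at hge
        have hlen : ¬ ((PySem.Set.ofList (r0 :: r :: rest')).length ≤ 1) := by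
          rw [e2]; omega
        rw [decide_eq_false hlen]
        simp [h]

-- A's value on the row list r0 :: rest is "every later row equals the first"
theorem pvA_rows (r0 : List Int) (rest : List (List Int)) :
    (if (r0 :: rest).length > 1 then
        pvLoopA (r0 :: rest) (PySem.List.pyRange 1 (r0 :: rest).length 1)
      else true) = rest.all (fun r => r == r0) := by
  cases rest with
  | nil => simp
  | cons r1 rest' =>
      rw [if_pos (by simp)]
      rw [pvLoopA_eq_all]
      have hmap := PySem.List.map_pyGetD_pyRange (xs := (r0 :: r1 :: rest'))
        (a := 1) (d := ([] : List Int)) (by norm_num)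
      have h0 : PySem.List.pyGetD (r0 :: r1 :: rest') (0 : Int) ([] : List Int) = r0 := by
        simp [pysem]
      calc (PySem.List.pyRange 1 (PySem.List.len (r0 :: r1 :: rest')) 1).all
            (fun i => PySem.List.pyGetD (r0 :: r1 :: rest') i [] == PySem.List.pyGetD (r0 :: r1 :: rest') 0 [])
          = ((PySem.List.pyRange 1 (PySem.List.len (r0 :: r1 :: rest')) 1).map
              (fun i => PySem.List.pyGetD (r0 :: r1 :: rest') i [])).all
              (fun v => v == PySem.List.pyGetD (r0 :: r1 :: rest') 0 []) := by
            rw [List.all_map]; rfl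
        _ = (r1 :: rest').all (fun v => v == r0) := by
            rw [hmap, h0]; rfl

theorem pv_all_congr {α : Type} {p q : α → Bool} : ∀ {l : List α},
    (∀ a ∈ l, p a = q a) → l.all p = l.all q := by
  intro l
  induction l with
  | nil => intro _; rfl
  | cons x xs ih =>
      intro h
      simp only [List.all_cons, h x (by simp), ih (fun a ha => h a (by simp [ha]))]

-- a column fold of Set.add is the distinct set of the mapped column
theorem pv_fold_ofList {α : Type} [BEq α] (f : Int → α) (samples : List Int) :
    samples.foldl (fun st s => PySem.Set.add st (f s)) PySem.Set.empty
      = PySem.Set.ofList (samples.map f) := by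
  rw [PySem.Set.ofList_eq_foldl, ← List.foldl_map]
  rfl

-- transposition: all rows equal to the first row ⟺ every column is constant
theorem pv_transpose (v : Int → Int → Int) (s0 : Int) (rest attrs : List Int) :
    rest.all (fun s => attrs.map (v s) == attrs.map (v s0))
      = attrs.all (fun a => rest.all (fun s => v s a == v s0 a)) := by
  rw [Bool.eq_iff_iff]
  simp only [List.all_eq_true, beq_iff_eq, List.map_inj_left]
  exact ⟨fun h a ha s hs => h s hs a ha, fun h s hs a ha => h a ha s hs⟩

-- the whole equivalence, abstracted over the value function v sample attr
theorem pv_main (v : Int → Int → Int) (samples attrs : List Int) :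
    (if (samples.map (fun s => attrs.map (v s))).length > 1 then
        pvLoopA (samples.map (fun s => attrs.map (v s)))
          (PySem.List.pyRange 1 ((samples.map (fun s => attrs.map (v s))).length : Int) 1)
      else true)
    = attrs.all (fun a =>
        decide (PySem.Set.len
          (samples.foldl (fun st s => PySem.Set.add st (v s a)) PySem.Set.empty) ≤ 1)) := by
  have hlen : ∀ (s : PySem.Set Int),
      decide (PySem.Set.len s ≤ 1) = decide (s.length ≤ 1) := by
    intro s; simp [PySem.Set.len]
  cases samples with
  | nil =>
      simp [PySem.Set.empty, PySem.Set.len]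
  | cons s0 rest =>
      rw [List.map_cons, pvA_rows, List.all_map]
      have hB : ∀ a ∈ attrs,
          decide (PySem.Set.len
            ((s0 :: rest).foldl (fun st s => PySem.Set.add st (v s a)) PySem.Set.empty) ≤ 1)
          = rest.all (fun s => v s a == v s0 a) := by
        intro a _
        rw [hlen, pv_fold_ofList (fun s => v s a) (s0 :: rest), List.map_cons,
          pv_set_card_le_one, List.all_map]
        rfl
      rw [pv_all_congr hB]
      exact pv_transpose v s0 rest attrs

-- ===== VERDICT (by name: the statement is the Claim_ definition above) =====
theorem same_on_attrs_spec : Claim_equal_same_on_attrs := by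
  intro samples train_features attrs _ _
  unfold Spec_same_on_attrs same_on_attrs same_on_attrs_alt
  simp only [pv_foldl_app, List.nil_append]
  exact pv_main
    (fun sample attr =>
      (PySem.Dict.ofList ((PySem.Dict.ofList train_features).getD sample [])).getD attr 0)
    samples attrs
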